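-- pv_equiv track=rewrite | github.com/cye2020/BaekJoon | 그룹 단어 체커/src/solution1.py | solution
-- ===== SOURCE A (Python) =====
-- def solution(N, words):
--     count = N
--     for word in words:
--         char_list = [x for x in word]
--         unique_char = list(set(char_list))
--
--         for char in unique_char:
--             num = char_list.count(char)
--             first_index = char_list.index(char)
--             last_index = len(char_list) - list(reversed(char_list)).index(char) - 1
--             if last_index - first_index + 1 != num:
--                 count -= 1
--                 break
--     return count
-- ===== SOURCE B (Python) =====
-- def solution(N, words):
--     # One pass per word: a word is a "group word" iff no character reappears
--     # after a different character intervened (seen-set + previous-char scan).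
--     bad = 0
--     for word in words:
--         seen = set()
--         prev = None
--         for ch in word:
--             if ch != prev:
--                 if ch in seen:
--                     bad += 1
--                     break
--                 seen.add(ch)
--                 prev = ch
--     return N - bad
-- ===== Notes on version B (the rewrite author's own statement) =====
-- stated objective: faster
-- what changed: Replaces A's per-word scan over every unique character with count/index/reversed-index passes by a single left-to-right pass per word that tracks the set of seen characters and the previous character, counting non-group words once and subtracting at the end.
import Mathlib
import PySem

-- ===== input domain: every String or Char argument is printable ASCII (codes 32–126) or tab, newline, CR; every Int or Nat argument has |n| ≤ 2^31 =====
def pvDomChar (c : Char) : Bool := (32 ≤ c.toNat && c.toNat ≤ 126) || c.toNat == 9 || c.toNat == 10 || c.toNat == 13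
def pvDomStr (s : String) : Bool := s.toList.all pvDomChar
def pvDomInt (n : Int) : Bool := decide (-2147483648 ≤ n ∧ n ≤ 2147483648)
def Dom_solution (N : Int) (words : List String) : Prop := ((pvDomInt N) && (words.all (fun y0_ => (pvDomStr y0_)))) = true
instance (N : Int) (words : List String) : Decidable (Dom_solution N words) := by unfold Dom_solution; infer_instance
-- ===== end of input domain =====

-- B replaces A's per-word unique-char scan (count/index/reversed-index per distinct char) by a
-- single left-to-right pass tracking seen characters and the previous character; faster in a timing run.


-- ===== PORT A =====
-- the inner `if last_index - first_index + 1 != num` condition for one char.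
-- `char` always occurs in `charList` (it comes from set(char_list)), so Python's `.index`
-- never raises; the `.getD 0` defaults are unreachable.
def solBad (charList : List Char) (char : Char) : Bool :=
  let num : Int := (PySem.List.count charList char : Int)
  let firstIndex : Int := ((PySem.List.index? charList char).getD 0 : Nat)
  let lastIndex : Int := (charList.length : Int) - ((PySem.List.index? charList.reverse char).getD 0 : Nat) - 1
  decide (lastIndex - firstIndex + 1 ≠ num)

-- the inner `for char in unique_char: … break` loop: returns true iff it broke (count -= 1).
-- Python iterates the set in hash order; the result (did ANY char fail) is order-independent,
-- so iterating PySem.Set.ofList's order is exact.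
def solCheck (charList : List Char) : List Char → Bool
  | [] => false
  | char :: rest => if solBad charList char then true else solCheck charList rest

def solution (N : Int) (words : List String) : Int :=
  words.foldl (fun count word =>
    let charList := word.toList
    let uniqueChar := PySem.Set.ofList charList
    if solCheck charList uniqueChar then count - 1 else count) N

-- ===== PORT B =====
-- single pass over the word: seen-set plus previous character; true iff the word is not a group word.
def altScan : List Char → PySem.Set Char → Option Char → Bool
  | [], _, _ => false
  | ch :: rest, seen, prev =>
    if some ch ≠ prev then
      if PySem.Set.contains seen ch then true
      else altScan rest (PySem.Set.add seen ch) (some ch)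
    else altScan rest seen prev

def solution_alt (N : Int) (words : List String) : Int :=
  N - words.foldl (fun bad word =>
    if altScan word.toList PySem.Set.empty none then bad + 1 else bad) 0

-- ===== PRECONDITION & SPEC =====
def Spec_solution (N : Int) (words : List String) (out : Int) : Prop := out = solution_alt N words
instance (N : Int) (words : List String) (out : Int) : Decidable (Spec_solution N words out) := by unfold Spec_solution; infer_instance

-- ===== CLAIM (what is proved, stated in full; the proofs are below) =====
def Claim_equal_solution : Prop := ∀ (N : Int) (words : List String), Dom_solution N words → Spec_solution N words (solution N words)

-- ===== LEMMAS AND PROOFS =====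

-- "not a group word", as a symmetric index spec both programs are proved equivalent to:
-- some character c occurs at i and k with a different character at j strictly in between.
def NG (l : List Char) : Prop :=
  ∃ (i j k : Nat) (c d : Char), i < j ∧ j < k ∧ l[k]? = some c ∧ l[i]? = some c ∧ l[j]? = some d ∧ d ≠ c

-- ---- A side ----

theorem solCheck_eq_any (l : List Char) (us : List Char) :
    solCheck l us = us.any (solBad l) := by
  induction us with
  | nil => simp [solCheck]
  | cons c rest ih => cases h : solBad l c <;> simp [solCheck, h, ih]

theorem first_spec {l : List Char} {c : Char} (hc : c ∈ l) :
    ∃ f, PySem.List.index? l c = some f ∧ f < l.length ∧ l[f]? = some c ∧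
      ∀ j < f, l[j]? ≠ some c := by
  obtain ⟨f, hf⟩ := Option.isSome_iff_exists.mp ((PySem.List.index?_isSome_iff l c).mpr hc)
  obtain ⟨hlt, hget, hprev⟩ := PySem.List.getElem_of_index?_eq_some hf
  refine ⟨f, hf, hlt, by simp [List.getElem?_eq_some_iff, hlt, hget], ?_⟩
  intro j hj h
  obtain ⟨hjl, hje⟩ := List.getElem?_eq_some_iff.mp h
  exact hprev j hj hje

theorem last_spec {l : List Char} {c : Char} (hc : c ∈ l) :
    ∃ r, PySem.List.index? l.reverse c = some r ∧ r < l.length ∧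
      l[l.length - 1 - r]? = some c ∧ ∀ m, l.length - 1 - r < m → l[m]? ≠ some c := by
  obtain ⟨r, hr⟩ := Option.isSome_iff_exists.mp
    ((PySem.List.index?_isSome_iff l.reverse c).mpr (by simpa using hc))
  obtain ⟨hlt, hget, hprev⟩ := PySem.List.getElem_of_index?_eq_some hr
  rw [List.length_reverse] at hlt
  refine ⟨r, hr, hlt, ?_, ?_⟩
  · have := List.getElem_reverse (l := l) (i := r) (by simpa using hlt)
    rw [List.getElem?_eq_some_iff]
    exact ⟨by omega, by rw [← this, hget]⟩
  · intro m hm h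
    obtain ⟨hml, hme⟩ := List.getElem?_eq_some_iff.mp h
    have hrev : l.reverse[l.length - 1 - m]'(by simp; omega) = c := by
      rw [List.getElem_reverse]; simpa [show l.length - 1 - (l.length - 1 - m) = m by omega] using hme
    exact hprev (l.length - 1 - m) (by omega) hrev

theorem contiguous_iff {l : List Char} {c : Char} {f e : Nat}
    (hfe : f ≤ e) (hel : e < l.length)
    (hfirst : ∀ j < f, l[j]? ≠ some c) (hlast : ∀ m, e < m → l[m]? ≠ some c) :
    (List.count c l = e + 1 - f ↔ ∀ j, f ≤ j → j ≤ e → l[j]? = some c) := by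
  set seg := (l.drop f).take (e + 1 - f) with hseg
  have hget : ∀ i : Nat, seg[i]? = if i < e + 1 - f then l[f + i]? else none := by
    intro i
    rw [hseg, List.getElem?_take, List.getElem?_drop]
  have hlen : seg.length = e + 1 - f := by
    simp [hseg]; omega
  have hdecomp : l = l.take f ++ seg ++ l.drop (e + 1) := by
    rw [hseg]
    rw [List.append_assoc]
    have h1 : (l.drop f).take (e + 1 - f) ++ l.drop (e + 1) = l.drop f := by
      have : l.drop (e + 1) = (l.drop f).drop (e + 1 - f) := by
        rw [List.drop_drop]
        congr 1
        omega
      rw [this, List.take_append_drop]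
    rw [h1, List.take_append_drop]
  have hcount : List.count c l = List.count c seg := by
    conv_lhs => rw [hdecomp]
    rw [List.count_append, List.count_append]
    have h0 : List.count c (l.take f) = 0 := by
      rw [List.count_eq_zero]
      intro hmem
      obtain ⟨i, hi⟩ := List.mem_iff_getElem?.mp hmem
      rw [List.getElem?_take] at hi
      split at hi
      · exact hfirst i (by assumption) hi
      · simp at hi
    have h2 : List.count c (l.drop (e + 1)) = 0 := by
      rw [List.count_eq_zero]
      intro hmem
      obtain ⟨i, hi⟩ := List.mem_iff_getElem?.mp hmem
      rw [List.getElem?_drop] at hi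
      exact hlast (e + 1 + i) (by omega) hi
    omega
  rw [hcount, ← hlen, List.count_eq_length]
  constructor
  · intro hall j hfj hje
    have hjl : j < l.length := by omega
    have hj : seg[j - f]? = some (l[j]'hjl) := by
      rw [hget]
      rw [if_pos (by omega), show f + (j - f) = j by omega]
      exact List.getElem?_eq_getElem hjl
    have hmem : l[j]'hjl ∈ seg := List.mem_iff_getElem?.mpr ⟨j - f, hj⟩
    rw [List.getElem?_eq_some_iff]
    exact ⟨hjl, (hall _ hmem).symm⟩
  · intro hall b hb
    obtain ⟨i, hi⟩ := List.mem_iff_getElem?.mp hb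
    rw [hget] at hi
    split at hi
    · have := hall (f + i) (by omega) (by omega)
      rw [this] at hi
      exact Option.some_injective _ hi
    · simp at hi

-- solBad characterization: for c ∈ l, solBad l c = true ↔ some slot between first and last occurrence is not c
theorem anyBad_iff_NG (l : List Char) :
    ((PySem.Set.ofList l).any (solBad l) = true) ↔ NG l := by
  rw [List.any_eq_true]
  constructor
  · rintro ⟨c, hcs, hbad⟩
    have hc : c ∈ l := (PySem.Set.mem_ofList l c).mp hcs
    obtain ⟨f, hfidx, hfl, hfget, hfirst⟩ := first_spec hc
    obtain ⟨r, hridx, hrl, heget, hlast⟩ := last_spec hc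
    set e := l.length - 1 - r with he
    have hfe : f ≤ e := by
      by_contra h
      exact hfirst e (by omega) heget
    have hel : e < l.length := by omega
    have hbad' : List.count c l ≠ e + 1 - f := by
      intro hcnt
      apply absurd hbad
      simp only [solBad, hfidx, hridx, PySem.List.count_eq, Option.getD_some, Bool.not_eq_true,
        decide_eq_false_iff_not, not_not]
      rw [hcnt]
      push_cast
      omega
    have hbad2 : ¬ ∀ j, f ≤ j → j ≤ e → l[j]? = some c :=
      fun hall => hbad' ((contiguous_iff hfe hel hfirst (fun m hm => hlast m (by omega))).mpr hall)
    push_neg at hbad2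
    obtain ⟨j, hfj, hje, hjne⟩ := hbad2
    have hjl : j < l.length := by omega
    obtain ⟨d, hd⟩ : ∃ d, l[j]? = some d := ⟨l[j]'hjl, List.getElem?_eq_getElem hjl⟩
    have hdc : d ≠ c := fun h => hjne (h ▸ hd)
    have hjf : f < j := by
      rcases Nat.lt_or_ge f j with h | h
      · exact h
      · have : j = f := by omega
        exact absurd (this ▸ hfget) (fun hh => hjne hh)
    have hjee : j < e := by
      rcases Nat.lt_or_ge j e with h | h
      · exact h
      · have : j = e := by omega
        exact absurd (this ▸ heget) (fun hh => hjne hh)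
    exact ⟨f, j, e, c, d, hjf, hjee, heget, hfget, hd, hdc⟩
  · rintro ⟨i, j, k, c, d, hij, hjk, hkc, hic, hjd, hdc⟩
    have hc : c ∈ l := List.mem_iff_getElem?.mpr ⟨i, hic⟩
    refine ⟨c, (PySem.Set.mem_ofList l c).mpr hc, ?_⟩
    obtain ⟨f, hfidx, hfl, hfget, hfirst⟩ := first_spec hc
    obtain ⟨r, hridx, hrl, heget, hlast⟩ := last_spec hc
    set e := l.length - 1 - r with he
    have hfi : f ≤ i := by
      by_contra h
      exact hfirst i (by omega) hic
    have hke : k ≤ e := by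
      by_contra h
      exact hlast k (by omega) hkc
    have hfe : f ≤ e := by omega
    have hel : e < l.length := by omega
    have hcnt : List.count c l ≠ e + 1 - f := by
      have hnall : ¬ ∀ j, f ≤ j → j ≤ e → l[j]? = some c := by
        push_neg
        exact ⟨j, by omega, by omega, fun h => hdc (Option.some_injective _ (h ▸ hjd).symm)⟩
      exact fun hcnt => hnall ((contiguous_iff hfe hel hfirst (fun m hm => hlast m (by omega))).mp hcnt)
    simp only [solBad, hfidx, hridx, PySem.List.count_eq, Option.getD_some, decide_eq_true_eq]
    intro hh
    apply hcnt
    omega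

-- ---- B side ----

def Viol (rest : List Char) (seen : List Char) (prev : Option Char) : Prop :=
  ∃ k c, rest[k]? = some c ∧ some c ≠ ((rest.take k).getLast?.or prev) ∧
    (c ∈ seen ∨ c ∈ rest.take k)

theorem altScan_iff (rest : List Char) : ∀ (seen : PySem.Set Char) (prev : Option Char),
    (∀ c, prev = some c → c ∈ seen) →
    (altScan rest seen prev = true ↔ Viol rest seen prev) := by
  induction rest with
  | nil =>
    intro seen prev _
    simp [altScan, Viol]
  | cons ch t ih =>
    intro seen prev hinv
    have hlastor : ∀ (q : List Char) (p : Option Char) (x : Char),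
        ((x :: q).getLast?.or p) = some (q.getLast?.getD x) := by
      intro q p x
      rw [List.getLast?_cons, Option.some_or]
    by_cases hp : some ch = prev
    · have hch : ch ∈ seen := hinv ch hp.symm
      rw [show altScan (ch :: t) seen prev = altScan t seen prev by simp [altScan, hp],
        ih seen prev hinv]
      constructor
      · rintro ⟨k, c, h1, h2, h3⟩
        refine ⟨k + 1, c, by simpa using h1, ?_, ?_⟩
        · rw [List.take_succ_cons, hlastor]
          rw [← hp, Option.or_some] at h2
          exact h2
        · rcases h3 with h | h
          · exact Or.inl h
          · exact Or.inr (List.mem_cons_of_mem _ h)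
      · rintro ⟨k, c, h1, h2, h3⟩
        match k with
        | 0 =>
          exfalso
          rw [List.getElem?_cons_zero] at h1
          rw [List.take_zero, List.getLast?_nil, Option.none_or] at h2
          exact h2 (h1 ▸ hp)
        | Nat.succ k' =>
          refine ⟨k', c, by simpa using h1, ?_, ?_⟩
          · rw [← hp, Option.or_some]
            rw [List.take_succ_cons, hlastor] at h2
            exact h2
          · rcases h3 with h | h
            · exact Or.inl h
            · rw [List.take_succ_cons, List.mem_cons] at h
              rcases h with h | h
              · exact Or.inl (h ▸ hch)
              · exact Or.inr h
    · by_cases hs : PySem.Set.contains seen ch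
      · have hmem : ch ∈ seen := (PySem.Set.contains_iff seen ch).mp hs
        rw [show altScan (ch :: t) seen prev = true from by
          simp only [altScan]; rw [if_pos hp, if_pos hs]]
        simp only [true_iff]
        refine ⟨0, ch, by simp, ?_, Or.inl hmem⟩
        rw [List.take_zero, List.getLast?_nil, Option.none_or]
        exact hp
      · have hns : ch ∉ seen := fun h => hs ((PySem.Set.contains_iff seen ch).mpr h)
        rw [show altScan (ch :: t) seen prev = altScan t (PySem.Set.add seen ch) (some ch) from by
          simp only [altScan]; rw [if_pos hp, if_neg hs]]
        rw [ih (PySem.Set.add seen ch) (some ch)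
          (by intro c h; rw [Option.some_inj] at h; rw [PySem.Set.mem_add]; exact Or.inr h.symm)]
        constructor
        · rintro ⟨k, c, h1, h2, h3⟩
          refine ⟨k + 1, c, by simpa using h1, ?_, ?_⟩
          · rw [List.take_succ_cons, hlastor]
            rw [Option.or_some] at h2
            exact h2
          · rcases h3 with h | h
            · rcases (PySem.Set.mem_add seen ch c).mp h with h' | h'
              · exact Or.inl h'
              · exact Or.inr (by simp [h'])
            · exact Or.inr (List.mem_cons_of_mem _ h)
        · rintro ⟨k, c, h1, h2, h3⟩
          match k with
          | 0 =>
            exfalso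
            rw [List.getElem?_cons_zero] at h1
            have hcch : c = ch := (Option.some_inj.mp h1).symm
            rw [List.take_zero] at h3
            rcases h3 with h | h
            · exact hns (hcch ▸ h)
            · simp at h
          | Nat.succ k' =>
            refine ⟨k', c, by simpa using h1, ?_, ?_⟩
            · rw [Option.or_some]
              rw [List.take_succ_cons, hlastor] at h2
              exact h2
            · rcases h3 with h | h
              · exact Or.inl ((PySem.Set.mem_add seen ch c).mpr (Or.inl h))
              · rw [List.take_succ_cons, List.mem_cons] at h
                rcases h with h | h
                · exact Or.inl ((PySem.Set.mem_add seen ch c).mpr (Or.inr h))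
                · exact Or.inr h

theorem viol_iff_NG (l : List Char) : Viol l [] none ↔ NG l := by
  have htake_last : ∀ (k : Nat), 0 < k → k ≤ l.length → (l.take k).getLast? = l[k-1]? := by
    intro k hk hkl
    rw [List.getLast?_eq_getElem?, List.getElem?_take, List.length_take]
    rw [Nat.min_eq_left hkl]
    rw [if_pos (by omega)]
  constructor
  · rintro ⟨k, c, h1, h2, h3⟩
    simp only [Option.or_none, List.mem_nil_iff, false_or] at h2 h3
    obtain ⟨i, hi⟩ := List.mem_iff_getElem?.mp h3
    rw [List.getElem?_take] at hi
    split at hi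
    case isTrue hik =>
      have hkl : k < l.length := (List.getElem?_eq_some_iff.mp h1).1
      have hk0 : 0 < k := by omega
      rw [htake_last k hk0 (by omega)] at h2
      have hk1l : k - 1 < l.length := by omega
      set d := l[k-1]'hk1l with hd
      have hdk : l[k-1]? = some d := List.getElem?_eq_getElem hk1l
      have hdc : d ≠ c := by
        intro h
        exact h2 (by rw [hdk, h])
      have hik1 : i < k - 1 := by
        rcases Nat.lt_or_ge i (k-1) with h | h
        · exact h
        · exfalso
          have : i = k - 1 := by omega
          rw [this, hdk] at hi
          exact hdc (Option.some_injective _ hi)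
      exact ⟨i, k-1, k, c, d, hik1, by omega, h1, hi, hdk, hdc⟩
    case isFalse => exact absurd hi (by simp)
  · rintro ⟨i, j, k, c, d, hij, hjk, hkc, hic, hjd, hdc⟩
    have hkl : k < l.length := (List.getElem?_eq_some_iff.mp hkc).1
    have hP : ∃ m, j < m ∧ l[m]? = some c := ⟨k, hjk, hkc⟩
    classical
    set m := Nat.find hP with hm
    obtain ⟨hjm, hmc⟩ := Nat.find_spec hP
    have hmin : ∀ m' < m, ¬(j < m' ∧ l[m']? = some c) := fun m' hm' => Nat.find_min hP hm'
    have hmk : m ≤ k := Nat.find_min' hP ⟨hjk, hkc⟩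
    have hml : m < l.length := by omega
    have hm0 : 0 < m := by omega
    have hm1l : m - 1 < l.length := by omega
    set d' := l[m-1]'hm1l with hd'
    have hdm : l[m-1]? = some d' := List.getElem?_eq_getElem hm1l
    have hcd' : c ≠ d' := by
      intro h
      rcases Nat.lt_or_ge j (m-1) with hcase | hcase
      · exact hmin (m-1) (by omega) ⟨hcase, by rw [hdm, h]⟩
      · have : m - 1 = j := by omega
        rw [this, hjd] at hdm
        exact hdc ((Option.some_inj.mp hdm).trans h.symm)
    refine ⟨m, c, hmc, ?_, ?_⟩
    · rw [Option.or_none, htake_last m hm0 (by omega), hdm]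
      simp [hcd']
    · refine Or.inr (List.mem_iff_getElem?.mpr ⟨i, ?_⟩)
      rw [List.getElem?_take, if_pos (by omega)]
      exact hic

-- ---- glue ----

theorem perWord (w : String) :
    solCheck w.toList (PySem.Set.ofList w.toList) = altScan w.toList PySem.Set.empty none := by
  have hA := (solCheck_eq_any w.toList (PySem.Set.ofList w.toList)) ▸ anyBad_iff_NG w.toList
  have hB := (altScan_iff w.toList PySem.Set.empty none (by intro c h; cases h)).trans (viol_iff_NG w.toList)
  rw [Bool.eq_iff_iff, hA, hB]

theorem foldl_sub (p : String → Bool) (ws : List String) : ∀ (N : Int),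
    ws.foldl (fun c w => if p w then c - 1 else c) N = N - (ws.countP p : Int) := by
  induction ws with
  | nil => simp
  | cons w t ih =>
    intro N
    by_cases h : p w <;> simp [List.foldl_cons, h, ih, List.countP_cons] <;> omega

-- ===== VERDICT (by name: the statement is the Claim_ definition above) =====
theorem solution_spec : Claim_equal_solution := by
  intro N words _
  unfold Spec_solution solution solution_alt
  have hfun : (fun (count : Int) (word : String) =>
      let charList := word.toList
      let uniqueChar := PySem.Set.ofList charList
      if solCheck charList uniqueChar then count - 1 else count)
      = (fun c w => if (fun w : String => altScan w.toList PySem.Set.empty none) w then c - 1 else c) := by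
    funext c w; simp only [perWord]
  rw [hfun, foldl_sub, PySem.List.foldl_count_if]
  simp [List.countP]
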